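-- pv_equiv track=rewrite | github.com/zhangjg98/cpsc481-tic-tac-toe-project | tic_tac_toe.py | check_consecutive
-- ===== SOURCE A (Python) =====
-- def check_consecutive(line: list, player_symbol: str, win_condition: int) -> bool:
--     """Checks if there are consecutive symbols of a player in a line"""
--     count = 0
--     for symbol in line:
--         if symbol == player_symbol:
--             count += 1
--             if count == win_condition:
--                 return True
--         else:
--             count = 0
--     return False
-- ===== SOURCE B (Python) =====
-- def _runs(line):
--     """Run-length encode the line into [symbol, length] pairs."""
--     runs = []
--     for sym in line:
--         if runs and runs[-1][0] == sym:
--             runs[-1][1] += 1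
--         else:
--             runs.append([sym, 1])
--     return runs
--
--
-- def check_consecutive(line: list, player_symbol: str, win_condition: int) -> bool:
--     """Checks if there are consecutive symbols of a player in a line"""
--     if win_condition <= 0:
--         return False
--     return any(sym == player_symbol and n >= win_condition for sym, n in _runs(line))
-- ===== Notes on version B (the rewrite author's own statement) =====
-- stated objective: alternative
-- what changed: Replaces the reset-counter scan with a run-length-encode-then-test decomposition: build maximal runs first, then check whether any run of player_symbol reaches win_condition (guarded by win_condition > 0, where no run can ever win).
import Mathlib
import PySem

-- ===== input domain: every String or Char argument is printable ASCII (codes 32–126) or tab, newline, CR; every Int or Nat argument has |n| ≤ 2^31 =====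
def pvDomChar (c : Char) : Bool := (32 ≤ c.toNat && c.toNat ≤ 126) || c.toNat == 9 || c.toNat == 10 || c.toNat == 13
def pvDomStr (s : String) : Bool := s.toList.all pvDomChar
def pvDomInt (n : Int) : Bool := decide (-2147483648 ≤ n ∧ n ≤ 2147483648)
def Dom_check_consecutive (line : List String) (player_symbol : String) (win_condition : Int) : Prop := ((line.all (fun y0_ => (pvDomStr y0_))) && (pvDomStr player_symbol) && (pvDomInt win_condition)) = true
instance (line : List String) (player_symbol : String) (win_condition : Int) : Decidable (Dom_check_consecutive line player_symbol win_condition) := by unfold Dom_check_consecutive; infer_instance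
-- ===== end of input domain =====

-- B replaces A's reset-counter scan with a run-length-encode-then-test decomposition (alternative, same cost).


-- ===== PORT A =====
-- A's for-loop with early return and a reset counter, as structural recursion over the line.
def checkLoop (p : String) (wc : Int) : List String → Int → Bool
  | [], _ => false
  | symbol :: rest, count =>
    if symbol == p then
      if count + 1 = wc then true else checkLoop p wc rest (count + 1)
    else
      checkLoop p wc rest 0

def check_consecutive (line : List String) (player_symbol : String) (win_condition : Int) : Bool :=
  checkLoop player_symbol win_condition line 0

-- ===== PORT B =====
-- B's _runs helper: one fold extending the last run or starting a new one.
def runsStep (runs : List (String × Int)) (sym : String) : List (String × Int) :=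
  match runs.getLast? with
  | some (s, n) => if s == sym then runs.dropLast ++ [(s, n + 1)] else runs ++ [(sym, 1)]
  | none => [(sym, 1)]

def runsOf (line : List String) : List (String × Int) :=
  line.foldl runsStep []

def check_consecutive_alt (line : List String) (player_symbol : String) (win_condition : Int) : Bool :=
  if win_condition ≤ 0 then false
  else (runsOf line).any (fun sn => sn.1 == player_symbol && decide (win_condition ≤ sn.2))

-- ===== PRECONDITION & SPEC =====
def Spec_check_consecutive (line : List String) (player_symbol : String) (win_condition : Int) (out : Bool) : Prop := out = check_consecutive_alt line player_symbol win_condition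
instance (line : List String) (player_symbol : String) (win_condition : Int) (out : Bool) : Decidable (Spec_check_consecutive line player_symbol win_condition out) := by unfold Spec_check_consecutive; infer_instance

-- ===== CLAIM (what is proved, stated in full; the proofs are below) =====
def Claim_equal_check_consecutive : Prop := ∀ (line : List String) (player_symbol : String) (win_condition : Int), Dom_check_consecutive line player_symbol win_condition → Spec_check_consecutive line player_symbol win_condition (check_consecutive line player_symbol win_condition)

-- ===== LEMMAS AND PROOFS =====

-- Bridge: "some maximal run of p (current run length c) reaches wc", checked greedily.
def hasRun (p : String) (wc : Int) : List String → Int → Bool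
  | [], _ => false
  | x :: l, c =>
    if x == p then (decide (wc ≤ c + 1) || hasRun p wc l (c + 1)) else hasRun p wc l 0

-- "any remaining run wins", with current run (s, n) open.
def contRun (p : String) (wc : Int) : List String → String → Int → Bool
  | [], s, n => s == p && decide (wc ≤ n)
  | x :: l, s, n =>
    if s == x then contRun p wc l s (n + 1)
    else ((s == p && decide (wc ≤ n)) || contRun p wc l x 1)

lemma checkLoop_nonpos (p : String) (wc : Int) (h : wc ≤ 0) :
    ∀ (l : List String) (c : Int), 0 ≤ c → checkLoop p wc l c = false := by
  intro l
  induction l with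
  | nil => intro c _; rfl
  | cons x l ih =>
    intro c hc
    simp only [checkLoop]
    by_cases hx : x == p
    · simp only [hx, if_true]
      have hne : ¬ (c + 1 = wc) := by omega
      simp only [hne, if_false]
      exact ih (c + 1) (by omega)
    · simp only [hx, if_false]
      exact ih 0 (by omega)

lemma checkLoop_eq_hasRun (p : String) (wc : Int) (h : 0 < wc) :
    ∀ (l : List String) (c : Int), c < wc → checkLoop p wc l c = hasRun p wc l c := by
  intro l
  induction l with
  | nil => intro c _; rfl
  | cons x l ih =>
    intro c hc
    simp only [checkLoop, hasRun]
    by_cases hx : x == p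
    · simp only [hx, if_true]
      by_cases he : c + 1 = wc
      · have : decide (wc ≤ c + 1) = true := by simp; omega
        simp [he, this]
      · have : decide (wc ≤ c + 1) = false := by simp; omega
        simp only [he, if_false, this, Bool.false_or]
        exact ih (c + 1) (by omega)
    · simp only [hx, if_false]
      exact ih 0 h

lemma contRun_eq_hasRun (p : String) (wc : Int) :
    ∀ (l : List String) (s : String) (n : Int),
      contRun p wc l s n =
        if s == p then (hasRun p wc l n || decide (wc ≤ n)) else hasRun p wc l 0 := by
  intro l
  induction l with
  | nil =>
    intro s n
    by_cases hs : s == p <;> simp [contRun, hasRun, hs]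
  | cons x l ih =>
    intro s n
    simp only [contRun, hasRun]
    by_cases hs : s == p
    · have hsp : s = p := by simpa using hs
      by_cases hx : x == p
      · have hxp : x = p := by simpa using hx
        have hsx : (s == x) = true := by simp [hsp, hxp]
        simp only [hs, hx, hsx, if_true, ih]
        by_cases hw : wc ≤ n
        · have h1 : decide (wc ≤ n) = true := by simpa using hw
          have h2 : decide (wc ≤ n + 1) = true := by simp; omega
          simp [h1, h2, Bool.or_comm, Bool.or_assoc, Bool.or_left_comm]
        · have h1 : decide (wc ≤ n) = false := by simpa using hw
          simp [h1, Bool.or_comm]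
      · have hsx : (s == x) = false := by
          by_contra hne
          have : s = x := by simpa using (Bool.of_not_eq_false hne)
          exact hx (by simp [← this, hsp])
        simp only [hsx, if_false, hs, hx, ih, if_false, Bool.true_and]
        simp [Bool.or_comm]
    · by_cases hsx : (s == x) = true
      · have : s = x := by simpa using hsx
        have hx : (x == p) = false := by
          simp only [← this]; exact Bool.eq_false_iff.mpr hs
        simp only [hsx, if_true, ih, ← this, Bool.eq_false_iff.mp hx]
        simp [hs, hx, Bool.eq_false_iff.mp hx]
      · have hsx' : (s == x) = false := Bool.eq_false_iff.mpr hsx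
        simp only [hsx', if_false, ih, Bool.eq_false_iff.mp (Bool.eq_false_iff.mpr hs)]
        by_cases hx : x == p
        · simp [hs, hx, Bool.or_comm]
        · simp [hs, Bool.eq_false_iff.mpr hx]

lemma any_foldl_runs (p : String) (wc : Int) :
    ∀ (l : List String) (rs : List (String × Int)) (s : String) (n : Int),
      ((l.foldl runsStep (rs ++ [(s, n)])).any (fun sn => sn.1 == p && decide (wc ≤ sn.2)))
        = (rs.any (fun sn => sn.1 == p && decide (wc ≤ sn.2)) || contRun p wc l s n) := by
  intro l
  induction l with
  | nil =>
    intro rs s n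
    simp [contRun, List.any_append]
  | cons x l ih =>
    intro rs s n
    simp only [List.foldl_cons]
    have hlast : (rs ++ [(s, n)]).getLast? = some (s, n) := by
      simp [List.getLast?_append]
    by_cases hsx : (s == x) = true
    · have hstep : runsStep (rs ++ [(s, n)]) x = rs ++ [(s, n + 1)] := by
        simp [runsStep, hlast, hsx, List.dropLast_concat]
      rw [hstep, ih]
      simp [contRun, hsx]
    · have hsx' : (s == x) = false := Bool.eq_false_iff.mpr hsx
      have hstep : runsStep (rs ++ [(s, n)]) x = (rs ++ [(s, n)]) ++ [(x, 1)] := by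
        simp [runsStep, hlast, hsx']
      rw [hstep, ih]
      simp [contRun, hsx', List.any_append, Bool.or_assoc]

-- ===== VERDICT (by name: the statement is the Claim_ definition above) =====
theorem check_consecutive_spec : Claim_equal_check_consecutive := by
  intro line p wc _
  show check_consecutive line p wc = check_consecutive_alt line p wc
  unfold check_consecutive check_consecutive_alt
  by_cases hw : wc ≤ 0
  · simp only [hw, if_true]
    exact checkLoop_nonpos p wc hw line 0 (le_refl 0)
  · have hpos : 0 < wc := by omega
    simp only [hw, if_false]
    rw [checkLoop_eq_hasRun p wc hpos line 0 hpos]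
    cases line with
    | nil => rfl
    | cons x l =>
      unfold runsOf
      simp only [List.foldl_cons]
      have h0 : runsStep [] x = [] ++ [(x, (1 : Int))] := by simp [runsStep]
      rw [h0, any_foldl_runs p wc l [] x 1]
      simp only [List.any_nil, Bool.false_or, contRun_eq_hasRun]
      simp only [hasRun]
      by_cases hx : x == p
      · simp [hx, Bool.or_comm]
      · simp [Bool.eq_false_iff.mpr hx]
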